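-- pv_equiv track=rewrite | github.com/Gustavoelidev/CommandTree | utils/get_cli_commands.py | _parse_sys_response
-- ===== SOURCE A (Python) =====
-- from typing import List, Union, Tuple, Callable
--
-- def _parse_sys_response(base_command: str, response_lines: List[str], start: int = 1, end: Union[int, None] = None) -> List[str]:
--     """
--     Extrai comandos da resposta do dispositivo no modo sys, ignorando as descrições.
--     """
--     commands: List[str] = []
--     baseline_indent: Union[int, None] = None
--     in_description = False  # Flag para identificar se estamos em uma descrição
--
--     if end is None:
--         end = len(response_lines) - 1
--
--     for line in response_lines[start:end]:
--         if line.strip():  # Ignora linhas vazias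
--             current_indent = len(line) - len(line.lstrip())  # Conta o número de espaços à esquerda
--
--             if baseline_indent is None:
--                 baseline_indent = current_indent  # Estabelece a indentação inicial
--
--             if current_indent == baseline_indent:  # Linha com a mesma indentação do comando
--                 command_part = line.strip().split()[0]
--                 if "denied" not in command_part:
--                     commands.append(f"{base_command} {command_part}")
--                 in_description = False  # Não estamos mais em uma descrição
--
--             elif current_indent > baseline_indent:  # Linha de descrição (com indentação maior)
--                 in_description = True  # Estamos em uma descrição, ignore esta linha
--
--             if in_description:  # Se estamos em uma descrição, ignoramos a linha
--                 continue
--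
--     return commands
-- ===== SOURCE B (Python) =====
-- from typing import List, Union
--
-- def _parse_sys_response(base_command: str, response_lines: List[str], start: int = 1, end: Union[int, None] = None) -> List[str]:
--     if end is None:
--         end = len(response_lines) - 1
--     # One pass: group the first token of every non-blank line by its indentation
--     # level into an insertion-ordered dict.  The first key inserted is the
--     # baseline indentation, so the answer is just that group, minus 'denied'.
--     groups = {}
--     for line in response_lines[start:end]:
--         if line.strip():
--             indent = len(line) - len(line.lstrip())
--             groups[indent] = groups.get(indent, []) + [line.strip().split()[0]]
--     if not groups:
--         return []
--     baseline = next(iter(groups))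
--     return [f"{base_command} {tok}" for tok in groups[baseline] if "denied" not in tok]
-- ===== Notes on version B (the rewrite author's own statement) =====
-- stated objective: alternative
-- what changed: A's fused loop with mutable baseline_indent/in_description state is replaced by building an insertion-ordered dict grouping each non-blank line's first token by its indentation, then reading off the first key's group (the baseline) and dropping 'denied' tokens; the dead in_description flag disappears.
import Mathlib
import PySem

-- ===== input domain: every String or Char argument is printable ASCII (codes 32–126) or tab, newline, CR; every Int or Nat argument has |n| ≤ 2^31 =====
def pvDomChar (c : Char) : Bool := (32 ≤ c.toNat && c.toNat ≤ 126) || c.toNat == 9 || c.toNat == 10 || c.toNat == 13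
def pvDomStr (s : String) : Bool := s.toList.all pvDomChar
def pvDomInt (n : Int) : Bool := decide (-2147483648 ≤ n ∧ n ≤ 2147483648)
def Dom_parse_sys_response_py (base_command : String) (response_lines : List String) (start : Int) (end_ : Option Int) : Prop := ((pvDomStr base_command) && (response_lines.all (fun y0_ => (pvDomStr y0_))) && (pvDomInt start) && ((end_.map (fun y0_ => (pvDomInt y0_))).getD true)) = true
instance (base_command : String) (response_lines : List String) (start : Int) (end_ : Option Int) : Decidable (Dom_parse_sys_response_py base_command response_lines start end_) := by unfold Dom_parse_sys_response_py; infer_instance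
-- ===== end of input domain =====

-- B replaces A's fused single pass with mutable baseline/in_description state by grouping
-- the first token of every non-blank line by indentation into an insertion-ordered dict,
-- then emitting the first key's group minus 'denied' tokens (objective: alternative).


-- shared helpers (both Pythons compute these very expressions)
def pvDenied : List Char := "denied".toList
-- len(line) - len(line.lstrip())
def pvIndent (line : String) : Nat := line.toList.length - (PySem.Chars.lstrip line.toList).length
-- line.strip().split()[0]  (callers guard that line.strip() is non-empty, so split() is non-empty)
def pvToken (line : String) : List Char := (PySem.Chars.split₀ (PySem.Chars.strip line.toList)).headD []
-- f"{base_command} {command_part}"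
def pvJoin (base_command : String) (cp : List Char) : String := String.ofList (base_command.toList ++ ' ' :: cp)

-- ===== PORT A =====
-- the body of A's loop for a non-blank line: update commands, baseline_indent, in_description
def pvStep (base_command : String) (st : List String × Option Nat × Bool) (line : String) : List String × Option Nat × Bool :=
  let ci := pvIndent line
  let bl := st.2.1.getD ci            -- "if baseline_indent is None: baseline_indent = ci"
  if ci = bl then
    ((if PySem.Chars.isIn pvDenied (pvToken line) then st.1 else st.1 ++ [pvJoin base_command (pvToken line)]), some bl, false)
  else if bl < ci then (st.1, some bl, true)
  else (st.1, some bl, st.2.2)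

def parse_sys_response_py (base_command : String) (response_lines : List String) (start : Int) (end_ : Option Int) : List String :=
  ((PySem.List.slice response_lines (some start) (some (end_.getD ((response_lines.length : Int) - 1)))).foldl
    (fun st line => if PySem.Chars.strip line.toList ≠ [] then pvStep base_command st line else st)
    ([], none, false)).1

-- ===== PORT B =====
-- groups[indent] = groups.get(indent, []) + [line.strip().split()[0]] over the non-blank slice lines
def pvGroups (lines : List String) : PySem.Dict Nat (List (List Char)) :=
  lines.foldl
    (fun d ln => if PySem.Chars.strip ln.toList ≠ [] then d.modify (pvIndent ln) [] (· ++ [pvToken ln]) else d)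
    PySem.Dict.empty

-- "if not groups: return []; baseline = next(iter(groups)); [... for tok in groups[baseline] if 'denied' not in tok]"
def pvFromGroups (base_command : String) (g : PySem.Dict Nat (List (List Char))) : List String :=
  match g.keys.head? with
  | none => []
  | some baseline =>
    ((g.getD baseline []).filter (fun t => !PySem.Chars.isIn pvDenied t)).map (pvJoin base_command)

def parse_sys_response_py_alt (base_command : String) (response_lines : List String) (start : Int) (end_ : Option Int) : List String :=
  pvFromGroups base_command
    (pvGroups (PySem.List.slice response_lines (some start) (some (end_.getD ((response_lines.length : Int) - 1)))))

-- ===== PRECONDITION & SPEC =====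
def Spec_parse_sys_response_py (base_command : String) (response_lines : List String) (start : Int) (end_ : Option Int) (out : List String) : Prop := out = parse_sys_response_py_alt base_command response_lines start end_
instance (base_command : String) (response_lines : List String) (start : Int) (end_ : Option Int) (out : List String) : Decidable (Spec_parse_sys_response_py base_command response_lines start end_ out) := by unfold Spec_parse_sys_response_py; infer_instance

-- ===== CLAIM (what is proved, stated in full; the proofs are below) =====
def Claim_equal_parse_sys_response_py : Prop := ∀ (base_command : String) (response_lines : List String) (start : Int) (end_ : Option Int), Dom_parse_sys_response_py base_command response_lines start end_ → Spec_parse_sys_response_py base_command response_lines start end_ (parse_sys_response_py base_command response_lines start end_)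

-- ===== LEMMAS AND PROOFS =====

-- both sides reduce to this canonical value over the non-blank lines of the slice
def pvCanon (base_command : String) (ls : List String) : List String :=
  match ls with
  | [] => []
  | first :: _ =>
    (ls.filter (fun ln => pvIndent ln == pvIndent first && !PySem.Chars.isIn pvDenied (pvToken ln))).map
      (fun ln => pvJoin base_command (pvToken ln))

-- once the baseline is fixed at `some b`, A's fold appends exactly the filtered-and-mapped lines
theorem pvFold_some (base_command : String) (b : Nat) :
    ∀ (ls : List String) (acc : List String) (d : Bool),
      (ls.foldl (pvStep base_command) (acc, some b, d)).1
      = acc ++ (ls.filter (fun ln => pvIndent ln == b && !PySem.Chars.isIn pvDenied (pvToken ln))).map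
          (fun ln => pvJoin base_command (pvToken ln)) := by
  intro ls
  induction ls with
  | nil => intro acc d; simp
  | cons ln t ih =>
    intro acc d
    simp only [List.foldl_cons]
    by_cases hci : pvIndent ln = b
    · by_cases hd : PySem.Chars.isIn pvDenied (pvToken ln)
      · simp [pvStep, hci, hd, ih]
      · simp [pvStep, hci, hd, ih]
    · by_cases hlt : b < pvIndent ln
      · simp [pvStep, hci, hlt, ih]
      · simp [pvStep, hci, hlt, ih]

-- A equals the canonical value
theorem pvA_canon (base_command : String) (response_lines : List String) (start : Int) (end_ : Option Int) :
    parse_sys_response_py base_command response_lines start end_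
      = pvCanon base_command
          ((PySem.List.slice response_lines (some start) (some (end_.getD ((response_lines.length : Int) - 1)))).filter
            (fun ln => decide (PySem.Chars.strip ln.toList ≠ []))) := by
  unfold parse_sys_response_py
  rw [PySem.List.foldl_ite_eq_foldl_filter]
  cases hsplit : (PySem.List.slice response_lines (some start)
      (some (end_.getD ((response_lines.length : Int) - 1)))).filter
      (fun ln => decide (PySem.Chars.strip ln.toList ≠ [])) with
  | nil => simp [pvCanon]
  | cons first rest =>
    simp only [List.foldl_cons, pvCanon]
    by_cases hd : PySem.Chars.isIn pvDenied (pvToken first)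
    · simp [pvStep, hd, pvFold_some]
    · simp [pvStep, hd, pvFold_some]

-- head of an ordered-dedup list is the head of the list
theorem pvHead_ofList (x : String → Nat) : ∀ (l : List String), (PySem.Set.ofList (l.map x)).head? = (l.map x).head? := by
  intro l
  cases l with
  | nil => rfl
  | cons a t =>
    show (List.foldl PySem.Set.add (PySem.Set.add [] (x a)) (t.map x)).head? = some (x a)
    rw [← PySem.Set.update_map_eq_foldl_add, PySem.Set.update_eq_append_filter]
    simp [PySem.Set.add]

-- B equals the canonical value
theorem pvB_canon (base_command : String) (response_lines : List String) (start : Int) (end_ : Option Int) :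
    parse_sys_response_py_alt base_command response_lines start end_
      = pvCanon base_command
          ((PySem.List.slice response_lines (some start) (some (end_.getD ((response_lines.length : Int) - 1)))).filter
            (fun ln => decide (PySem.Chars.strip ln.toList ≠ []))) := by
  unfold parse_sys_response_py_alt pvGroups
  rw [PySem.List.foldl_ite_eq_foldl_filter]
  cases hsplit : (PySem.List.slice response_lines (some start)
      (some (end_.getD ((response_lines.length : Int) - 1)))).filter
      (fun ln => decide (PySem.Chars.strip ln.toList ≠ [])) with
  | nil => simp [pvCanon, pvFromGroups, PySem.Dict.empty]
  | cons first rest =>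
    have hkeys : ((first :: rest).foldl
        (fun (d : PySem.Dict Nat (List (List Char))) ln => d.modify (pvIndent ln) [] (· ++ [pvToken ln]))
        PySem.Dict.empty).keys.head? = some (pvIndent first) := by
      rw [PySem.Dict.keys_foldl_modify_key ((first :: rest)) pvIndent [] (fun _ ln => (· ++ [pvToken ln]))]
      rw [PySem.Dict.keys_empty, PySem.Set.update_nil_left, pvHead_ofList]
      simp
    have hgetD : ((first :: rest).foldl
        (fun (d : PySem.Dict Nat (List (List Char))) ln => d.modify (pvIndent ln) [] (· ++ [pvToken ln]))
        PySem.Dict.empty).getD (pvIndent first) []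
        = ((first :: rest).filter (fun ln => pvIndent ln == pvIndent first)).map pvToken := by
      rw [show ((first :: rest).foldl
          (fun (d : PySem.Dict Nat (List (List Char))) ln => d.modify (pvIndent ln) [] (· ++ [pvToken ln]))
          PySem.Dict.empty)
          = (((first :: rest).map (fun ln => (pvIndent ln, pvToken ln))).foldl
              (fun d p => d.modify p.1 [] (· ++ [p.2])) PySem.Dict.empty) from by rw [List.foldl_map]]
      rw [PySem.Dict.getD_foldl_modify_append]
      rw [PySem.Dict.getD_empty, List.nil_append, List.filter_map, List.map_map]
      rfl
    simp only [pvFromGroups, hkeys, hgetD, pvCanon]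
    rw [List.filter_map, List.map_map, List.filter_filter]
    have hpred : (fun a => ((fun t => !PySem.Chars.isIn pvDenied t) ∘ pvToken) a && pvIndent a == pvIndent first)
        = (fun ln => pvIndent ln == pvIndent first && !PySem.Chars.isIn pvDenied (pvToken ln)) := by
      funext a; simp [Function.comp, Bool.and_comm]
    rw [hpred]
    rfl

theorem parse_sys_eq (base_command : String) (response_lines : List String) (start : Int) (end_ : Option Int) :
    parse_sys_response_py base_command response_lines start end_
      = parse_sys_response_py_alt base_command response_lines start end_ := by
  rw [pvA_canon, pvB_canon]

-- ===== VERDICT (by name: the statement is the Claim_ definition above) =====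
theorem parse_sys_response_py_spec : Claim_equal_parse_sys_response_py := by
  intro base_command response_lines start end_ _
  exact parse_sys_eq base_command response_lines start end_
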